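-- pv_equiv track=rewrite | github.com/SanjayNithin2002/weird-faculty | weirdfaculty.py | exam
-- ===== SOURCE A (Python) =====
-- def exam(v):
--     for k in range(len(v)):
--         b,c=0,0
--         for i in range(k):
--             if v[i]==1:b+=1
--             elif v[i]==0:b-=1
--         for j in range(k,len(v)):
--                 if v[j]==1:c+=1
--                 elif v[j]==0:c-=1
--         if b>c:
--                 return k
-- ===== SOURCE B (Python) =====
-- def exam(v):
--     total = 0
--     for x in v:
--         if x == 1:
--             total += 1
--         elif x == 0:
--             total -= 1
--     b = 0
--     for k, x in enumerate(v):
--         if 2 * b > total: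
--             return k
--         if x == 1:
--             b += 1
--         elif x == 0:
--             b -= 1
--     return None
-- ===== Notes on version B (the rewrite author's own statement) =====
-- stated objective: faster
-- what changed: Replaces the O(n^2) recomputation of prefix and suffix balances at every index with a single pass that precomputes the total balance and maintains the prefix balance incrementally (prefix > suffix iff 2*prefix > total).
import Mathlib
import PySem

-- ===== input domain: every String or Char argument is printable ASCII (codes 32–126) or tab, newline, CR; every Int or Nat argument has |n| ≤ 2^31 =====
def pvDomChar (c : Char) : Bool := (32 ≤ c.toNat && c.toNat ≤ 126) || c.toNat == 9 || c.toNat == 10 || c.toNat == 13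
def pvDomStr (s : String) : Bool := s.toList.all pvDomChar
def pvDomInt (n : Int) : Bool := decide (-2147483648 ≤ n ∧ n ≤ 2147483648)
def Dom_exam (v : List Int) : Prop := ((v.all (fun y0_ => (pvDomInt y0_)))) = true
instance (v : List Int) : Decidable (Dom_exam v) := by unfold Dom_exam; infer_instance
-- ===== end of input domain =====

-- B replaces A's quadratic recomputation of prefix/suffix balances by one linear pass
-- (precompute the total balance; prefix > suffix iff 2*prefix > total). Timed faster (asymptotic).


-- ===== PORT A =====
def exam (v : List Int) : Option Int :=
  (PySem.List.pyRange 0 v.length 1).foldl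
    (fun acc k =>
      match acc with
      | some r => some r
      | none =>
        let b : Int := (PySem.List.pyRange 0 k 1).foldl
          (fun b i =>
            if PySem.List.pyGetD v i 0 = 1 then b + 1
            else if PySem.List.pyGetD v i 0 = 0 then b - 1
            else b) 0
        let c : Int := (PySem.List.pyRange k v.length 1).foldl
          (fun c j =>
            if PySem.List.pyGetD v j 0 = 1 then c + 1
            else if PySem.List.pyGetD v j 0 = 0 then c - 1
            else c) 0
        if b > c then some k else none)
    none

-- ===== PORT B =====
def examAltGo (total : Int) : List Int → Int → Int → Option Int
  | [], _, _ => none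
  | x :: xs, k, b =>
    if 2 * b > total then some k
    else examAltGo total xs (k + 1) (if x = 1 then b + 1 else if x = 0 then b - 1 else b)

def exam_alt (v : List Int) : Option Int :=
  let total := v.foldl (fun t x => if x = 1 then t + 1 else if x = 0 then t - 1 else t) 0
  examAltGo total v 0 0

-- ===== PRECONDITION & SPEC =====
def Spec_exam (v : List Int) (out : Option Int) : Prop := out = exam_alt v
instance (v : List Int) (out : Option Int) : Decidable (Spec_exam v out) := by unfold Spec_exam; infer_instance

-- ===== CLAIM (what is proved, stated in full; the proofs are below) =====
def Claim_equal_exam : Prop := ∀ (v : List Int), Dom_exam v → Spec_exam v (exam v)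

-- ===== LEMMAS AND PROOFS =====

/-- The ±1 contribution of one element. -/
def pvDelta (x : Int) : Int := if x = 1 then 1 else if x = 0 then -1 else 0

/-- Balance of a list. -/
def pvBal (l : List Int) : Int := (l.map pvDelta).sum

theorem pvBal_nil : pvBal [] = 0 := rfl

theorem pvBal_cons (x : Int) (l : List Int) : pvBal (x :: l) = pvDelta x + pvBal l := by
  simp [pvBal]

theorem pvBal_append (l1 l2 : List Int) : pvBal (l1 ++ l2) = pvBal l1 + pvBal l2 := by
  simp [pvBal]

theorem foldl_step_eq (l : List Int) (init : Int) :
    l.foldl (fun t x => if x = 1 then t + 1 else if x = 0 then t - 1 else t) init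
      = init + pvBal l := by
  induction l generalizing init with
  | nil => simp [pvBal]
  | cons x xs ih =>
    simp only [List.foldl_cons, ih, pvBal_cons, pvDelta]
    split_ifs <;> ring

/-- First-some foldl with an absorbing accumulator is `findSome?`. -/
theorem foldl_first_eq_findSome? (g : Int → Option Int) (l : List Int) :
    l.foldl (fun acc k => match acc with | some r => some r | none => g k) none
      = l.findSome? g := by
  induction l with
  | nil => rfl
  | cons x xs ih =>
    simp only [List.foldl_cons, List.findSome?_cons]
    cases hgx : g x with
    | some r =>
      clear ih
      induction xs with
      | nil => rfl
      | cons y ys ih2 => simpa using ih2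
    | none => exact ih

theorem findSome?_congr_mem (g g' : Int → Option Int) :
    ∀ (l : List Int), (∀ x ∈ l, g x = g' x) → l.findSome? g = l.findSome? g' := by
  intro l
  induction l with
  | nil => intro _; rfl
  | cons x xs ih =>
    intro h
    simp only [List.findSome?_cons, h x (by simp)]
    cases g' x with
    | some r => rfl
    | none => exact ih (fun y hy => h y (by simp [hy]))

/-- A's inner prefix loop computes the balance of `v.take k`. -/
theorem inner_prefix (v : List Int) :
    ∀ (k : Nat), k ≤ v.length →
    (PySem.List.pyRange 0 k 1).foldl
        (fun b i =>
          if PySem.List.pyGetD v i 0 = 1 then b + 1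
          else if PySem.List.pyGetD v i 0 = 0 then b - 1
          else b) 0
      = pvBal (v.take k) := by
  intro k
  induction k with
  | zero => intro _; simp [pvBal]
  | succ k ih =>
    intro hk
    have hk' : k ≤ v.length := Nat.le_of_succ_le hk
    have hcast : ((k + 1 : Nat) : Int) = (k : Int) + 1 := by push_cast; ring
    rw [hcast, PySem.List.pyRange_one_succ_right (by omega)]
    rw [List.foldl_append, ih hk']
    have hget : PySem.List.pyGetD v (k : Int) 0 = v[k]'(by omega) := by
      rw [PySem.List.pyGetD_eq_getElem v (0:Int) (by omega) (by exact_mod_cast hk)]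
      simp
    have htake : v.take (k + 1) = v.take k ++ [v[k]'(by omega)] :=
      List.take_succ_eq_append_getElem (by omega)
    rw [htake, pvBal_append]
    simp only [List.foldl_cons, List.foldl_nil, hget]
    have : pvBal [v[k]'(by omega)] = pvDelta (v[k]'(by omega)) := by simp [pvBal]
    rw [this, pvDelta]
    split_ifs <;> ring

/-- B's loop finds the first qualifying index. -/
theorem examAltGo_eq (total : Int) :
    ∀ (xs : List Int) (k b : Int),
    examAltGo total xs k b
      = (PySem.List.pyRange k (k + xs.length) 1).findSome?
          (fun j => if 2 * (b + pvBal (xs.take (j - k).toNat)) > total then some j else none) := by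
  intro xs
  induction xs with
  | nil =>
    intro k b
    simp only [List.length_nil, Nat.cast_zero, add_zero,
      PySem.List.pyRange_one_eq_nil (le_refl k), List.findSome?_nil]
    rfl
  | cons x xs ih =>
    intro k b
    have hlen : (k : Int) < k + (x :: xs).length := by simp
    rw [PySem.List.pyRange_one_cons hlen, List.findSome?_cons]
    have h0 : ((k : Int) - k).toNat = 0 := by omega
    simp only [h0, List.take_zero, pvBal_nil, add_zero]
    by_cases hb : 2 * b > total
    · simp [examAltGo, hb]
    · simp only [if_neg hb, examAltGo, ih]
      have hlen2 : (k : Int) + ((x :: xs).length : Int) = (k + 1) + (xs.length : Int) := by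
        simp; omega
      rw [hlen2]
      apply findSome?_congr_mem
      intro j hj
      rw [PySem.List.mem_pyRange_one] at hj
      have hjk : ((j - k).toNat) = ((j - (k + 1)).toNat) + 1 := by omega
      have htk : (x :: xs).take ((j - k).toNat) = x :: xs.take ((j - (k + 1)).toNat) := by
        rw [hjk]; rfl
      rw [htk, pvBal_cons]
      have hd : b + (pvDelta x + pvBal (xs.take ((j - (k + 1)).toNat)))
          = (if x = 1 then b + 1 else if x = 0 then b - 1 else b)
            + pvBal (xs.take ((j - (k + 1)).toNat)) := by
        simp only [pvDelta]; split_ifs <;> ring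
      rw [hd]

/-- A as a findSome? over the index range. -/
theorem exam_eq_findSome? (v : List Int) :
    exam v = (PySem.List.pyRange 0 v.length 1).findSome?
      (fun k => if 2 * pvBal (v.take k.toNat) > pvBal v then some k else none) := by
  unfold exam
  rw [foldl_first_eq_findSome?]
  apply findSome?_congr_mem
  intro k hk
  rw [PySem.List.mem_pyRange_one] at hk
  have hk0 : 0 ≤ k := hk.1
  have hkn : k.toNat ≤ v.length := by omega
  have hb := inner_prefix v k.toNat hkn
  have hkcast : ((k.toNat : Nat) : Int) = k := by omega
  rw [hkcast] at hb
  have hc : (PySem.List.pyRange k v.length 1).foldl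
      (fun c j =>
        if PySem.List.pyGetD v j 0 = 1 then c + 1
        else if PySem.List.pyGetD v j 0 = 0 then c - 1
        else c) 0 = pvBal (v.drop k.toNat) := by
    rw [PySem.List.foldl_pyRange_pyGetD' v 0
      (fun c x => if x = 1 then c + 1 else if x = 0 then c - 1 else c) 0 hk0]
    simpa using foldl_step_eq (v.drop k.toNat) 0
  simp only [hb, hc]
  have hsplit : pvBal v = pvBal (v.take k.toNat) + pvBal (v.drop k.toNat) := by
    conv_lhs => rw [← List.take_append_drop k.toNat v]
    exact pvBal_append _ _
  have hiff : (pvBal (v.take k.toNat) > pvBal (v.drop k.toNat))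
      ↔ (2 * pvBal (v.take k.toNat) > pvBal v) := by omega
  exact if_congr hiff rfl rfl

-- ===== VERDICT (by name: the statement is the Claim_ definition above) =====
theorem exam_spec : Claim_equal_exam := by
  intro v _
  unfold Spec_exam exam_alt
  rw [exam_eq_findSome?, foldl_step_eq, zero_add, examAltGo_eq]
  simp only [zero_add]
  apply findSome?_congr_mem
  intro j hj
  simp
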